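-- pv_equiv track=rewrite | github.com/arthur-oliver/faculdade | Algoritmo e Lógica de Programação/Exercícios Listas/Lista 13/Lista 13 Google Python Class - Resolução.py | x_antes
-- ===== SOURCE A (Python) =====
-- def x_antes(words):
--   resultado = []
--   lista_x = []
--   lista_abc = []
--   for word in words:
--     if word[0] == 'x':
--       lista_x.append(word)
--     else:
--       lista_abc.append(word)
--   resultado = sorted(lista_x) + sorted(lista_abc)
--   return resultado
-- ===== SOURCE B (Python) =====
-- def x_antes(words):
--   return sorted(words, key=lambda w: ('0' if w[0] == 'x' else '1') + w)
-- ===== Notes on version B (the rewrite author's own statement) =====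
-- stated objective: idiomatic
-- what changed: Replaced the partition-into-two-lists loop plus two sorts and a concatenation by a single sorted() call with a composite key that puts 'x'-starting words first and orders alphabetically within each group.
import Mathlib
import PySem

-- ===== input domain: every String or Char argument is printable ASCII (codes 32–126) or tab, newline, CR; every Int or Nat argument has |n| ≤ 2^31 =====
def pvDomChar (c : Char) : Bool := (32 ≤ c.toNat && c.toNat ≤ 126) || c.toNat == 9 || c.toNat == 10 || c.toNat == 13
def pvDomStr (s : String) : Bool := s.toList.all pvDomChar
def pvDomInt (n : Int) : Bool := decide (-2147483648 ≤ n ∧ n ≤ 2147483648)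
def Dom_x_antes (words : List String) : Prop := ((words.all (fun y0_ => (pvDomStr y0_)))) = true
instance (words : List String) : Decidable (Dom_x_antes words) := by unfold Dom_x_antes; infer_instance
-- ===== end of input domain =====

-- B replaces A's partition loop + two sorts + concatenation by one sorted() call with a
-- composite key (group tag, word); same ordering, more idiomatic (no speed claim).

-- ===== PORT A =====
-- sorted(xs, key=k) for a code-point-list key (pinning the lexicographic order instance)
def pvSortedByKey (xs : List String) (k : String → List Char) : List String :=
  @PySem.List.sorted String (List Char) List.instLinearOrder.toLT LinearOrder.toDecidableLT xs k false

-- word[0] == 'x' (string comparison on one code point; ports A's and B's identical test)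
def pvIsX (word : String) : Bool := PySem.Str.pyGet? word 0 == some 'x'

def x_antes (words : List String) : List String :=
  -- the for-loop: partition into lista_x / lista_abc by appending
  let p := words.foldl
    (fun (acc : List String × List String) word =>
      if pvIsX word then (acc.1 ++ [word], acc.2) else (acc.1, acc.2 ++ [word]))
    ([], [])
  -- sorted(lista_x) + sorted(lista_abc); Python string order = code-point lex = List Char lex
  pvSortedByKey p.1 (fun w => w.toList) ++ pvSortedByKey p.2 (fun w => w.toList)

-- ===== PORT B =====
-- key ('0' if w[0]=='x' else '1') + w, as a code-point list (Python string order = this lex order)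
def pvKeyB (w : String) : List Char :=
  (if pvIsX w then '0' else '1') :: w.toList

def x_antes_alt (words : List String) : List String :=
  pvSortedByKey words pvKeyB

-- ===== PRECONDITION & SPEC =====
-- Pre_ excludes lists containing the empty string "", on which both Pythons raise IndexError at w[0].
def Pre_x_antes (words : List String) : Prop := "" ∉ words
instance (words : List String) : Decidable (Pre_x_antes words) := by unfold Pre_x_antes; infer_instance
def pvWitness_x_antes : List String := (["xyz", "abc", "xa"])

def Spec_x_antes (words : List String) (out : List String) : Prop := out = x_antes_alt words
instance (words : List String) (out : List String) : Decidable (Spec_x_antes words out) := by unfold Spec_x_antes; infer_instance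

-- ===== CLAIM (what is proved, stated in full; the proofs are below) =====
def Claim_equal_x_antes : Prop := ∀ (words : List String), Dom_x_antes words → Pre_x_antes words → Spec_x_antes words (x_antes words)

-- ===== LEMMAS AND PROOFS =====

-- A's loop is a partition: the two accumulators are the two filters of the input.
lemma x_antes_fold (words : List String) (a b : List String) :
    words.foldl
      (fun (acc : List String × List String) word =>
        if pvIsX word then (acc.1 ++ [word], acc.2) else (acc.1, acc.2 ++ [word]))
      (a, b)
    = (a ++ words.filter pvIsX, b ++ words.filter (fun w => !pvIsX w)) := by
  induction words generalizing a b with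
  | nil => simp
  | cons w ws ih =>
    by_cases h : pvIsX w = true <;> simp [List.foldl_cons, h, ih]

lemma cons_le_cons_char (c : Char) {a b : List Char} (h : a ≤ b) : c :: a ≤ c :: b := by
  rcases lt_or_eq_of_le h with h | rfl
  · exact le_of_lt (List.cons_lt_cons_self.mpr h)
  · exact le_refl _

lemma pvSorted_perm (xs : List String) (k : String → List Char) :
    (pvSortedByKey xs k).Perm xs :=
  @PySem.List.sorted_perm String (List Char) List.instLinearOrder.toLT LinearOrder.toDecidableLT xs k false

lemma pvSorted_pairwise (xs : List String) (k : String → List Char) :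
    List.Pairwise (fun a b => k a ≤ k b) (pvSortedByKey xs k) :=
  @PySem.List.sorted_pairwise String (List Char) List.instLinearOrder xs k

lemma pvMem_sorted (xs : List String) (k : String → List Char) (x : String) :
    x ∈ pvSortedByKey xs k ↔ x ∈ xs :=
  @PySem.List.mem_sorted String (List Char) List.instLinearOrder.toLT LinearOrder.toDecidableLT xs k false x

lemma pvKeyB_injective : Function.Injective pvKeyB := by
  intro a b h
  unfold pvKeyB at h
  injection h with _ h2
  exact String.toList_inj.mp h2

lemma x_antes_eq_alt (words : List String) : x_antes words = x_antes_alt words := by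
  unfold x_antes x_antes_alt
  rw [x_antes_fold]
  simp only [List.nil_append]
  set f1 := words.filter pvIsX with hf1
  set f2 := words.filter (fun w => !pvIsX w) with hf2
  apply PySem.List.eq_of_perm_of_pairwise_le_of_injective pvKeyB pvKeyB_injective
  · -- permutation
    exact (((pvSorted_perm f1 _).append (pvSorted_perm f2 _)).trans
      (List.filter_append_perm pvIsX words)).trans (pvSorted_perm words pvKeyB).symm
  · -- A's output is pairwise ordered for the composite key
    rw [List.pairwise_append]
    refine ⟨?_, ?_, ?_⟩
    · refine (pvSorted_pairwise f1 (fun w => w.toList)).imp_of_mem ?_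
      intro x y hx _ h
      have hx' : pvIsX x = true :=
        (List.mem_filter.mp ((pvMem_sorted f1 _ x).mp hx)).2
      have hy' : pvIsX y = true := by
        have := (pvMem_sorted f1 _ y).mp ‹y ∈ _›
        exact (List.mem_filter.mp this).2
      simpa [pvKeyB, hx', hy'] using cons_le_cons_char '0' h
    · refine (pvSorted_pairwise f2 (fun w => w.toList)).imp_of_mem ?_
      intro x y hx hy h
      have hx' : pvIsX x = false := by
        have := (List.mem_filter.mp ((pvMem_sorted f2 _ x).mp hx)).2
        simpa using this
      have hy' : pvIsX y = false := by
        have := (List.mem_filter.mp ((pvMem_sorted f2 _ y).mp hy)).2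
        simpa using this
      simpa [pvKeyB, hx', hy'] using cons_le_cons_char '1' h
    · intro x hx y hy
      have hx' : pvIsX x = true :=
        (List.mem_filter.mp ((pvMem_sorted f1 _ x).mp hx)).2
      have hy' : pvIsX y = false := by
        have := (List.mem_filter.mp ((pvMem_sorted f2 _ y).mp hy)).2
        simpa using this
      simp only [pvKeyB, hx', hy', if_pos]
      exact le_of_lt (List.lex_eq_true_iff_lt.mp rfl)
  · -- B's output is pairwise ordered for the composite key
    exact pvSorted_pairwise words pvKeyB

-- ===== VERDICT (by name: the statement is the Claim_ definition above) =====
theorem x_antes_spec : Claim_equal_x_antes := by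
  intro words _ _
  unfold Spec_x_antes
  exact x_antes_eq_alt words
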